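-- pv_equiv track=rewrite | github.com/vitalyor/awgbot | src/awg_fileflow.py | _drop_peer_block_in_text
-- ===== SOURCE A (Python) =====
-- from typing import Dict, Any, List, Optional, Tuple
--
-- def _drop_peer_block_in_text(conf_text: str, pubkey: str) -> str:
--     out_lines: List[str] = []
--     lines = conf_text.splitlines()
--     i = 0
--     while i < len(lines):
--         line = lines[i]
--         if line.strip() == "[Peer]":
--             j = i + 1
--             buf = [line]
--             keep = True
--             while j < len(lines) and lines[j].strip() != "[Peer]":
--                 buf.append(lines[j])
--                 if lines[j].strip().startswith("PublicKey"):
--                     _, val = lines[j].split("=", 1)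
--                     if val.strip() == pubkey:
--                         keep = False
--                 j += 1
--             if keep:
--                 out_lines.extend(buf)
--             i = j
--             continue
--         else:
--             out_lines.append(line)
--             i += 1
--     return "\n".join(out_lines) + ("\n" if out_lines and out_lines[-1] != "" else "")
-- ===== SOURCE B (Python) =====
-- from typing import List
--
-- def _peer_block_matches(seg: List[str], pubkey: str) -> bool:
--     for line in seg:
--         if line.strip().startswith("PublicKey"):
--             _, val = line.split("=", 1)
--             if val.strip() == pubkey:
--                 return True
--     return False
--
-- def _drop_peer_block_in_text(conf_text: str, pubkey: str) -> str:
--     lines = conf_text.splitlines()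
--     # one grouping pass: preamble segment, then one segment per "[Peer]" header
--     segments: List[List[str]] = []
--     cur: List[str] = []
--     for line in lines:
--         if line.strip() == "[Peer]":
--             segments.append(cur)
--             cur = [line]
--         else:
--             cur.append(line)
--     segments.append(cur)
--     out_lines: List[str] = []
--     for k, seg in enumerate(segments):
--         if k == 0 or not _peer_block_matches(seg, pubkey):
--             out_lines.extend(seg)
--     return "\n".join(out_lines) + ("\n" if out_lines and out_lines[-1] != "" else "")
-- ===== Notes on version B (the rewrite author's own statement) =====
-- stated objective: alternative
-- what changed: Replaces A's nested index-walking while loops (inner scan with a keep flag and manual index jumps) by a single grouping pass that splits the lines into a preamble plus one segment per '[Peer]' header, followed by a declarative keep/drop filter over the enumerated segments.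
import Mathlib
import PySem

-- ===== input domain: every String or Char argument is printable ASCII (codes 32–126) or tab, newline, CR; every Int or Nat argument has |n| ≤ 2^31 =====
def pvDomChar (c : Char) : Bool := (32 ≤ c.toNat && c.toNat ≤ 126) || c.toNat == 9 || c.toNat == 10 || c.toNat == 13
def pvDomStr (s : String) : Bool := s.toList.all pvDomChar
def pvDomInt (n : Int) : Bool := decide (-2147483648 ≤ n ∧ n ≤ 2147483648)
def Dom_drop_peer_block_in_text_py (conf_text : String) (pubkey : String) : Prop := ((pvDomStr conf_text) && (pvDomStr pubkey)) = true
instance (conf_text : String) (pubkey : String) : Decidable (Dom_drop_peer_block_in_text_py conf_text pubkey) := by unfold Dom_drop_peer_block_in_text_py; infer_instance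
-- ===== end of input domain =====

-- B replaces A's nested index-walking while loops by one grouping pass into segments plus a
-- declarative keep/drop filter over the segments (objective: alternative decomposition, same cost).

-- ===== PORT A =====
-- `val` of `_, val = line.split("=", 1)`; when '=' is absent Python raises ValueError (those
-- inputs are excluded by Pre_; here the default "" is returned instead).
def pvValAfterEq (line : String) : String :=
  ((PySem.Str.splitMax? line "=" 1).getD []).getD 1 ""

-- the inner `while j < len(lines) and lines[j].strip() != "[Peer]"` loop of A:
-- state (remaining lines, buf, keep); returns (buf, keep, remaining lines from j on)
def pvInnerA (pubkey : String) : List String → List String → Bool → (List String × Bool × List String)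
  | [], buf, keep => (buf, keep, [])
  | l :: rs, buf, keep =>
    if PySem.Str.strip l == "[Peer]" then (buf, keep, l :: rs)
    else
      pvInnerA pubkey rs (buf ++ [l])
        (if PySem.Str.startswith (PySem.Str.strip l) "PublicKey" then
           (if PySem.Str.strip (pvValAfterEq l) == pubkey then false else keep)
         else keep)

-- termination helper for the outer loop: the inner loop only consumes lines
theorem pvInnerA_len (pubkey : String) :
    ∀ (rs buf : List String) (keep : Bool), (pvInnerA pubkey rs buf keep).2.2.length ≤ rs.length := by
  intro rs
  induction rs with
  | nil => intro buf keep; simp [pvInnerA]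
  | cons l rs ih =>
    intro buf keep
    simp only [pvInnerA]
    split
    · simp
    · exact le_trans (ih _ _) (Nat.le_succ _)

-- the outer `while i < len(lines)` loop of A, on the suffix of lines from i on
def pvGoA (pubkey : String) : List String → List String
  | [] => []
  | line :: rest =>
    if PySem.Str.strip line == "[Peer]" then
      let r := pvInnerA pubkey rest [line] true
      (if r.2.1 then r.1 else []) ++ pvGoA pubkey r.2.2
    else
      line :: pvGoA pubkey rest
termination_by ls => ls.length
decreasing_by
  · exact Nat.lt_succ_of_le (pvInnerA_len pubkey rest [line] true)
  · simp

def drop_peer_block_in_text_py (conf_text : String) (pubkey : String) : String :=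
  let out_lines := pvGoA pubkey (PySem.Str.splitlines conf_text)
  PySem.Str.join "\n" out_lines ++
    (if !out_lines.isEmpty && !(PySem.List.pyGet? out_lines (-1) == some "") then "\n" else "")

-- ===== PORT B =====
-- B's helper _peer_block_matches (a for loop returning at the first match = List.any)
def pvBlockMatches (seg : List String) (pubkey : String) : Bool :=
  seg.any (fun line =>
    PySem.Str.startswith (PySem.Str.strip line) "PublicKey" &&
    (PySem.Str.strip (((PySem.Str.splitMax? line "=" 1).getD []).getD 1 "") == pubkey))

def drop_peer_block_in_text_py_alt (conf_text : String) (pubkey : String) : String :=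
  let lines := PySem.Str.splitlines conf_text
  -- grouping pass: flush cur and restart it at every "[Peer]" line
  let st := lines.foldl
    (fun (st : List (List String) × List String) line =>
      if PySem.Str.strip line == "[Peer]" then (st.1 ++ [st.2], [line]) else (st.1, st.2 ++ [line]))
    ([], [])
  let segments := st.1 ++ [st.2]
  -- keep the preamble (k == 0) and every non-matching segment
  let out_lines := (PySem.List.enumerate segments 0).foldl
    (fun acc ks => if ks.1 == 0 || !pvBlockMatches ks.2 pubkey then acc ++ ks.2 else acc) []
  PySem.Str.join "\n" out_lines ++
    (if !out_lines.isEmpty && !(PySem.List.pyGet? out_lines (-1) == some "") then "\n" else "")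

-- ===== PRECONDITION & SPEC =====
-- Pre_ excludes exactly the inputs on which Python A raises ValueError: a line inside a peer
-- block (i.e. after some "[Peer]" line) whose strip() starts with "PublicKey" but contains no '='.
def Pre_drop_peer_block_in_text_py (conf_text : String) (pubkey : String) : Prop :=
  ∀ j : Fin (PySem.Str.splitlines conf_text).length,
    PySem.Str.startswith (PySem.Str.strip ((PySem.Str.splitlines conf_text).get j)) "PublicKey" = true →
    ((PySem.Str.splitlines conf_text).take j).any (fun l => PySem.Str.strip l == "[Peer]") = true →
    PySem.Str.isIn "=" ((PySem.Str.splitlines conf_text).get j) = true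
instance (conf_text : String) (pubkey : String) : Decidable (Pre_drop_peer_block_in_text_py conf_text pubkey) := by
  unfold Pre_drop_peer_block_in_text_py; infer_instance

def pvWitness_drop_peer_block_in_text_py : String × String :=
  ("[Interface]\nAddress = 10.0.0.1\n\n[Peer]\nPublicKey = abc\n\n[Peer]\nPublicKey = xyz\n", "abc")

def Spec_drop_peer_block_in_text_py (conf_text : String) (pubkey : String) (out : String) : Prop := out = drop_peer_block_in_text_py_alt conf_text pubkey
instance (conf_text : String) (pubkey : String) (out : String) : Decidable (Spec_drop_peer_block_in_text_py conf_text pubkey out) := by unfold Spec_drop_peer_block_in_text_py; infer_instance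

-- ===== CLAIM (what is proved, stated in full; the proofs are below) =====
def Claim_equal_drop_peer_block_in_text_py : Prop := ∀ (conf_text : String) (pubkey : String), Dom_drop_peer_block_in_text_py conf_text pubkey → Pre_drop_peer_block_in_text_py conf_text pubkey → Spec_drop_peer_block_in_text_py conf_text pubkey (drop_peer_block_in_text_py conf_text pubkey)

-- ===== LEMMAS AND PROOFS =====

-- proof-side abbreviations
def pvIsPeer (l : String) : Bool := PySem.Str.strip l == "[Peer]"
def pvHit (pubkey l : String) : Bool :=
  PySem.Str.startswith (PySem.Str.strip l) "PublicKey" &&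
  (PySem.Str.strip (((PySem.Str.splitMax? l "=" 1).getD []).getD 1 "") == pubkey)

theorem pvBlockMatches_eq_any (seg : List String) (pubkey : String) :
    pvBlockMatches seg pubkey = seg.any (pvHit pubkey) := rfl

theorem pvPeer_not_hit (pubkey l : String) (h : pvIsPeer l = true) : pvHit pubkey l = false := by
  have h' : PySem.Str.strip l = "[Peer]" := by simpa [pvIsPeer] using h
  have hs : PySem.Str.startswith (PySem.Str.strip l) "PublicKey" = false := by rw [h']; decide
  unfold pvHit
  rw [hs]
  simp

-- characterization of the inner loop: it consumes the non-"[Peer]" prefix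
theorem pvInnerA_eq (pubkey : String) :
    ∀ (rs buf : List String) (keep : Bool),
      pvInnerA pubkey rs buf keep =
        (buf ++ rs.takeWhile (fun l => !pvIsPeer l),
         keep && !(rs.takeWhile (fun l => !pvIsPeer l)).any (pvHit pubkey),
         rs.dropWhile (fun l => !pvIsPeer l)) := by
  intro rs
  induction rs with
  | nil => intro buf keep; simp [pvInnerA]
  | cons l rs ih =>
    intro buf keep
    cases hh : pvIsPeer l with
    | true =>
      have hh' : (PySem.Str.strip l == "[Peer]") = true := by simpa [pvIsPeer] using hh
      simp [pvInnerA, hh', hh]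
    | false =>
      have hh' : (PySem.Str.strip l == "[Peer]") = false := by simpa [pvIsPeer] using hh
      have hk : (if PySem.Str.startswith (PySem.Str.strip l) "PublicKey" then
           (if PySem.Str.strip (pvValAfterEq l) == pubkey then false else keep)
         else keep) = (keep && !pvHit pubkey l) := by
        unfold pvHit pvValAfterEq
        cases h1 : PySem.Str.startswith (PySem.Str.strip l) "PublicKey" <;>
          cases h2 : (PySem.Str.strip (((PySem.Str.splitMax? l "=" 1).getD []).getD 1 "") == pubkey) <;>
            simp
      simp only [pvInnerA, hh', Bool.false_eq_true, if_false, hk]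
      rw [ih]
      simp [hh, Bool.and_assoc]

-- proof-side image of B's grouping pass
def pvGroup (cur : List String) : List String → List (List String)
  | [] => [cur]
  | l :: ls => if pvIsPeer l then cur :: pvGroup [l] ls else pvGroup (cur ++ [l]) ls

theorem pvGroup_ne_nil (cur : List String) (xs : List String) : pvGroup cur xs ≠ [] := by
  induction xs generalizing cur with
  | nil => simp [pvGroup]
  | cons l ls ih =>
    cases hh : pvIsPeer l <;> simp [pvGroup, hh]
    exact ih _

theorem pvFold_group (xs : List String) :
    ∀ (done : List (List String)) (cur : List String),
      (xs.foldl
        (fun (st : List (List String) × List String) line =>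
          if PySem.Str.strip line == "[Peer]" then (st.1 ++ [st.2], [line]) else (st.1, st.2 ++ [line]))
        (done, cur)).1 ++
      [(xs.foldl
        (fun (st : List (List String) × List String) line =>
          if PySem.Str.strip line == "[Peer]" then (st.1 ++ [st.2], [line]) else (st.1, st.2 ++ [line]))
        (done, cur)).2] = done ++ pvGroup cur xs := by
  induction xs with
  | nil => intro done cur; simp [pvGroup]
  | cons l ls ih =>
    intro done cur
    cases hh : pvIsPeer l with
    | true =>
      have hh' : (PySem.Str.strip l == "[Peer]") = true := by simpa [pvIsPeer] using hh
      simp only [List.foldl_cons, hh', if_true, pvGroup, hh]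
      rw [ih]
      simp
    | false =>
      have hh' : (PySem.Str.strip l == "[Peer]") = false := by simpa [pvIsPeer] using hh
      simp only [List.foldl_cons, hh', Bool.false_eq_true, if_false, pvGroup, hh]
      exact ih done (cur ++ [l])

theorem pvGroup_append (xs : List String) :
    ∀ (a b : List String), pvGroup (a ++ b) xs = (pvGroup b xs).modifyHead (a ++ ·) := by
  induction xs with
  | nil => intro a b; simp [pvGroup]
  | cons l ls ih =>
    intro a b
    cases hh : pvIsPeer l <;> simp only [pvGroup, hh, Bool.false_eq_true, if_false, if_true]
    · rw [List.append_assoc]; exact ih a (b ++ [l])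
    · simp [List.modifyHead]

theorem pvGroup_nonPeer (t : List String) (ht : ∀ x ∈ t, pvIsPeer x = false) :
    ∀ (cur d : List String), pvGroup cur (t ++ d) = pvGroup (cur ++ t) d := by
  induction t with
  | nil => intro cur d; simp
  | cons x t ih =>
    intro cur d
    have hx : pvIsPeer x = false := ht x (by simp)
    have ht' : ∀ y ∈ t, pvIsPeer y = false := fun y hy => ht y (by simp [hy])
    simp only [List.cons_append, pvGroup, hx, Bool.false_eq_true, if_false]
    rw [ih ht' (cur ++ [x]) d, List.append_assoc]
    rfl

-- B's filter pass over the enumerated segments, for indices ≥ 1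
theorem pvEnumFold (pubkey : String) :
    ∀ (segs : List (List String)) (acc : List String) (n : Int), 1 ≤ n →
      (PySem.List.enumerate segs n).foldl
        (fun acc ks => if ks.1 == 0 || !pvBlockMatches ks.2 pubkey then acc ++ ks.2 else acc) acc
      = acc ++ (segs.filter (fun s => !pvBlockMatches s pubkey)).flatten := by
  intro segs
  induction segs with
  | nil => intro acc n _; simp [PySem.List.enumerate_nil]
  | cons s ss ih =>
    intro acc n hn
    have hne : (n == 0) = false := by simp; omega
    rw [PySem.List.enumerate_cons, List.foldl_cons]
    cases hm : pvBlockMatches s pubkey <;>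
      simp only [hne, Bool.false_or, Bool.not_false, Bool.not_true, if_true] <;>
        rw [ih _ (n + 1) (by omega)] <;> simp [hm]

-- what B computes from a segment decomposition
def pvSpecOut (pubkey : String) : List (List String) → List String
  | [] => []
  | s0 :: ss => s0 ++ (ss.filter (fun s => !pvBlockMatches s pubkey)).flatten

-- MAIN: A's nested loops compute exactly B's keep/drop over the grouping of the lines
theorem pvMain (pubkey : String) :
    ∀ (lines : List String), pvGoA pubkey lines = pvSpecOut pubkey (pvGroup [] lines) := by
  have key : ∀ (n : Nat) (lines : List String), lines.length ≤ n →
      pvGoA pubkey lines = pvSpecOut pubkey (pvGroup [] lines) := by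
    intro n
    induction n with
    | zero =>
      intro lines h
      have : lines = [] := List.eq_nil_of_length_eq_zero (Nat.le_zero.mp h)
      subst this
      simp [pvGoA, pvGroup, pvSpecOut]
    | succ n ih =>
      intro lines h
      match lines with
      | [] => simp [pvGoA, pvGroup, pvSpecOut]
      | l :: rest =>
        have hlen : rest.length ≤ n := by simpa using Nat.lt_succ_iff.mp (by simpa using h)
        cases hh : pvIsPeer l with
        | false =>
          have hh' : (PySem.Str.strip l == "[Peer]") = false := by simpa [pvIsPeer] using hh
          rw [pvGoA]
          simp only [hh', Bool.false_eq_true, if_false]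
          rw [ih rest hlen]
          have hg1 : pvGroup [] (l :: rest) = pvGroup [l] rest := by
            simp [pvGroup, hh]
          have hg2 : pvGroup [l] rest = (pvGroup [] rest).modifyHead ([l] ++ ·) := by
            have := pvGroup_append rest [l] []
            simpa using this
          cases hg : pvGroup [] rest with
          | nil => exact absurd hg (pvGroup_ne_nil [] rest)
          | cons s0 ss =>
            rw [hg1, hg2, hg]
            simp [List.modifyHead, pvSpecOut]
        | true =>
          have hh' : (PySem.Str.strip l == "[Peer]") = true := by simpa [pvIsPeer] using hh
          rw [pvGoA]
          simp only [hh', if_true]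
          rw [pvInnerA_eq]
          dsimp only
          simp only [Bool.true_and]
          have htall : ∀ x ∈ List.takeWhile (fun x => !pvIsPeer x) rest, pvIsPeer x = false := by
            intro x hx
            have := List.mem_takeWhile_imp hx
            simpa using this
          have hrest : List.takeWhile (fun x => !pvIsPeer x) rest ++
              List.dropWhile (fun x => !pvIsPeer x) rest = rest := List.takeWhile_append_dropWhile
          have hdn : (List.dropWhile (fun x => !pvIsPeer x) rest).length ≤ n :=
            le_trans (List.length_dropWhile_le _ _) hlen
          have hhead := List.head?_dropWhile_not (fun x => !pvIsPeer x) rest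
          generalize htd : List.takeWhile (fun x => !pvIsPeer x) rest = t at hrest htall ⊢
          generalize hdd : List.dropWhile (fun x => !pvIsPeer x) rest = d at hrest hdn hhead ⊢
          have hany : pvBlockMatches (l :: t) pubkey = t.any (pvHit pubkey) := by
            rw [pvBlockMatches_eq_any]
            simp [List.any_cons, pvPeer_not_hit pubkey l hh]
          match d, hrest, hdn, hhead with
          | [], hrest, hdn, hhead =>
            have hr : rest = t := by simpa using hrest.symm
            subst hr
            have hg : pvGroup [l] rest = [l :: rest] := by
              have := pvGroup_nonPeer rest htall [l] []
              simpa [pvGroup] using this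
            have hg1 : pvGroup [] (l :: rest) = [] :: pvGroup [l] rest := by
              simp [pvGroup, hh]
            rw [hg1, hg]
            simp only [pvSpecOut, List.filter_cons, hany]
            cases hta : rest.any (pvHit pubkey) <;> simp [pvGoA]
          | l' :: ds, hrest, hdn, hhead =>
            have hpl' : pvIsPeer l' = true := by simpa using hhead
            have hg1 : pvGroup [] (l :: rest) = [] :: pvGroup [l] rest := by
              simp [pvGroup, hh]
            have hg2 : pvGroup [l] rest = (l :: t) :: pvGroup [l'] ds := by
              rw [← hrest, pvGroup_nonPeer t htall [l] (l' :: ds)]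
              simp [pvGroup, hpl']
            have hIH : pvGoA pubkey (l' :: ds) =
                (List.filter (fun s => !pvBlockMatches s pubkey) (pvGroup [l'] ds)).flatten := by
              rw [ih (l' :: ds) hdn]
              have : pvGroup [] (l' :: ds) = [] :: pvGroup [l'] ds := by
                simp [pvGroup, hpl']
              rw [this]
              simp [pvSpecOut]
            rw [hg1, hg2, hIH]
            simp only [pvSpecOut, List.filter_cons, hany]
            cases hta : t.any (pvHit pubkey) <;> simp
  intro lines
  exact key lines.length lines le_rfl

theorem pvPorts_eq (conf_text pubkey : String) :
    drop_peer_block_in_text_py conf_text pubkey = drop_peer_block_in_text_py_alt conf_text pubkey := by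
  unfold drop_peer_block_in_text_py drop_peer_block_in_text_py_alt
  set lines := PySem.Str.splitlines conf_text with hl
  have hseg := pvFold_group lines [] []
  simp only [List.nil_append] at hseg
  cases hg : pvGroup [] lines with
  | nil => exact absurd hg (pvGroup_ne_nil [] lines)
  | cons s0 ss =>
    rw [hg] at hseg
    have hout :
        (PySem.List.enumerate (s0 :: ss) 0).foldl
          (fun acc ks => if ks.1 == 0 || !pvBlockMatches ks.2 pubkey then acc ++ ks.2 else acc) [] =
        pvSpecOut pubkey (s0 :: ss) := by
      rw [PySem.List.enumerate_cons, List.foldl_cons]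
      simp only [BEq.rfl, Bool.true_or, if_true, List.nil_append, zero_add]
      rw [pvEnumFold pubkey ss s0 1 le_rfl]
      rfl
    have hA : pvGoA pubkey lines = pvSpecOut pubkey (s0 :: ss) := by
      rw [pvMain pubkey lines, hg]
    simp only [hseg, hout, hA]

-- ===== VERDICT (by name: the statement is the Claim_ definition above) =====
theorem drop_peer_block_in_text_py_spec : Claim_equal_drop_peer_block_in_text_py := by
  intro conf_text pubkey _ _
  unfold Spec_drop_peer_block_in_text_py
  exact pvPorts_eq conf_text pubkey
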